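-- pv_equiv track=rewrite | github.com/magina2302/videotto-assessment | src/debouncer.py | debounce_speaker_ids
-- ===== SOURCE A (Python) =====
-- def debounce_speaker_ids(speaker_track_ids, min_hold_frames=15):
--     """
--     Remove rapid speaker-ID bounces shorter than min_hold_frames.
--
--     Speaker detection sometimes flickers the active-speaker label during
--     crosstalk or brief classification uncertainty, producing 1-10 frame
--     segments that cause jarring rapid-fire crop snaps. This pre-filter
--     replaces those short segments with the surrounding stable speaker ID
--     so the downstream dead-zone tracker never sees them.
--
--     Algorithm:
--       1. Run-length encode the raw IDs into (track_id, start, length) runs.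
--       2. For any run shorter than min_hold_frames, replace it with the
--          previous stable run's ID (or the next stable run if it's the first).
--       3. Expand back to a per-frame list.
--
--     Args:
--         speaker_track_ids: Per-frame list of speaker IDs (int or None).
--             None means no speaker detected at that frame.
--         min_hold_frames: Minimum frames a speaker must hold to be "stable".
--
--     Returns:
--         Same-length list with short flicker runs replaced by nearest stable ID.
--         None segments are never modified.
--
--     Examples:
--         >>> debounce_speaker_ids([0]*50 + [1]*3 + [0]*50, min_hold_frames=10)
--         [0]*103  # The 3-frame speaker-1 segment is replaced by speaker 0
--
--         >>> debounce_speaker_ids([None]*10 + [0]*50, min_hold_frames=15)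
--         [None]*10 + [0]*50  # None segments are untouched
--     """
--     #raise NotImplementedError("TODO: Implement this function — see docstring for spec")
--
--     if not speaker_track_ids: #handles empty input
--         return []
--
--     #1. Run-length encode the raw IDs into (track_id, start, length) runs.
--     runs = []
--     start = 0
--     current = speaker_track_ids[0]  #current speaker ID for the run being built
--
--     for i in range(1, len(speaker_track_ids)):
--         if speaker_track_ids[i] != current:  #close the current run when the speaker ID changes
--             runs.append((current, start, i - start))
--             current = speaker_track_ids[i] #start tracking the new speaker ID
--             start = i
--
--     runs.append((current, start, len(speaker_track_ids) - start)) #append the last run, which reaches the end of the list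
--
--     #run should contain all the consecutive ID segments
--
--     #2. For any run shorter than min_hold_frames, replace it with the previous stable run's ID (or the next stable run if it's the first).
--     new_runs = runs.copy() #edit a copy so replacement decisions are based on the original runs
--
--     for i, (track_id, start, length) in enumerate(runs):
--         #never modify None segments
--         if track_id is None:
--             continue
--
--         #keep the stable runs unchanged
--         if length >= min_hold_frames:
--             continue
--
--         replacement = None
--
--         #search backwards for the nearest previous stable run that isn't none
--         for j in range(i - 1, -1, -1):
--             prev_id, _prev_start, prev_len = runs[j]
--             if prev_id is not None and prev_len >= min_hold_frames:
--                 replacement = prev_id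
--                 break
--
--         # if no previous stable run exists, use the next stable run that isn't none
--         if replacement is None:
--             for j in range(i + 1, len(runs)):
--                 next_id, _next_start, next_len = runs[j]
--                 if next_id is not None and next_len >= min_hold_frames:
--                     replacement = next_id
--                     break
--
--         #only replace if a stable neighbor exists --> if not leave it unchanged
--         if replacement is not None:
--             new_runs[i] = (replacement, start, length)
--
--     #3. Expand back to a per-frame list.
--     result = []
--     for track_id, _start, length in new_runs:
--         result.extend([track_id] * length)
--
--     return result
-- ===== SOURCE B (Python) =====
-- def debounce_speaker_ids(speaker_track_ids, min_hold_frames=15):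
--     """O(n) debounce: run-length encode, then precompute nearest previous/next
--     stable run IDs with two linear scans instead of per-run nested searches."""
--     # 1. Run-length encode (value, length).
--     runs = []
--     i = 0
--     n = len(speaker_track_ids)
--     while i < n:
--         j = i + 1
--         while j < n and speaker_track_ids[j] == speaker_track_ids[i]:
--             j += 1
--         runs.append((speaker_track_ids[i], j - i))
--         i = j
--
--     def stable(v, ln):
--         return v is not None and ln >= min_hold_frames
--
--     # 2a. Nearest previous stable id for each run (one forward scan).
--     prev_stable = []
--     last = None
--     for v, ln in runs:
--         prev_stable.append(last)
--         if stable(v, ln):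
--             last = v
--
--     # 2b. Nearest next stable id for each run (one backward scan).
--     next_rev = []
--     last = None
--     for v, ln in reversed(runs):
--         next_rev.append(last)
--         if stable(v, ln):
--             last = v
--     next_stable = next_rev[::-1]
--
--     # 3. Emit per-frame ids, replacing short non-None runs.
--     out = []
--     for (v, ln), p, nx in zip(runs, prev_stable, next_stable):
--         if v is not None and ln < min_hold_frames:
--             r = p if p is not None else nx
--             if r is not None:
--                 v = r
--         out.extend([v] * ln)
--     return out
-- ===== Notes on version B (the rewrite author's own statement) =====
-- stated objective: faster
-- what changed: Replaces A's per-short-run nested backward/forward scans over the run list with two linear passes that precompute each run's nearest previous and next stable id, making the run-replacement phase linear.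
import Mathlib
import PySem

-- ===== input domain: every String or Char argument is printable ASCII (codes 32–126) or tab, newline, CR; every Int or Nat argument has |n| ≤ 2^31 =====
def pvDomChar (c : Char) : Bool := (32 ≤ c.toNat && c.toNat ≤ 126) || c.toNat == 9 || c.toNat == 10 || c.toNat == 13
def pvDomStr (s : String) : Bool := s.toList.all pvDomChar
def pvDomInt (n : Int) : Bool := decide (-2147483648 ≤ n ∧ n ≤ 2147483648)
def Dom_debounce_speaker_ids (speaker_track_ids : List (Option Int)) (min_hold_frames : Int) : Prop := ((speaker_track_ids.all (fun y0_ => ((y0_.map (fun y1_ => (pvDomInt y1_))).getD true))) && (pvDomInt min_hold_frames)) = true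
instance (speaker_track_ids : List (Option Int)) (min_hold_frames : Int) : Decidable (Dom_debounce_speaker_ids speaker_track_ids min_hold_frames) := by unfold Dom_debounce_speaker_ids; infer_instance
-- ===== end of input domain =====

-- B replaces A's per-run quadratic backward/forward stable-neighbor searches by two
-- linear scans (nearest-previous / nearest-next stable id per run); objective: faster.


-- ===== PORT A =====
-- phase-1 loop body: close the current run when the id changes (xs[i] is always
-- in range in A, so getD's default is never used)
def pvStepA (xs : List (Option Int))
    (st : List (Option Int × Nat × Nat) × Option Int × Nat) (i : Nat) :
    List (Option Int × Nat × Nat) × Option Int × Nat :=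
  let v := xs.getD i none
  if v ≠ st.2.1 then (st.1 ++ [(st.2.1, st.2.2, i - st.2.2)], v, i) else st

-- run-length encode into (track_id, start, length) runs, A's index loop
def pvRunsA (xs : List (Option Int)) : List (Option Int × Nat × Nat) :=
  let st := (List.range' 1 (xs.length - 1)).foldl (pvStepA xs) ([], xs.headD none, 0)
  st.1 ++ [(st.2.1, st.2.2, xs.length - st.2.2)]

-- A's backward search `for j in range(i-1, -1, -1)` with break
def pvFindPrev (runs : List (Option Int × Nat × Nat)) (mhf : Int) : Nat → Option Int
  | 0 => none
  | j + 1 =>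
    let r := runs.getD j (none, 0, 0)
    if r.1.isSome && decide ((r.2.2 : Int) ≥ mhf) then r.1 else pvFindPrev runs mhf j

-- A's forward search `for j in range(i+1, len(runs))` with break
def pvFindNext (runs : List (Option Int × Nat × Nat)) (mhf : Int) (j : Nat) : Option Int :=
  if h : j < runs.length then
    let r := runs[j]
    if r.1.isSome && decide ((r.2.2 : Int) ≥ mhf) then r.1 else pvFindNext runs mhf (j + 1)
  else none
termination_by runs.length - j

def debounce_speaker_ids (speaker_track_ids : List (Option Int)) (min_hold_frames : Int) : List (Option Int) :=
  if speaker_track_ids = [] then []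
  else
    let runs := pvRunsA speaker_track_ids
    -- each index of new_runs is assigned at most once, from runs[i]: a map over enumerate
    let new_runs := (PySem.List.enumerate runs).map (fun p =>
      let r := p.2
      if r.1.isNone then r
      else if decide ((r.2.2 : Int) ≥ min_hold_frames) then r
      else
        let repl := pvFindPrev runs min_hold_frames p.1.toNat
        let repl := if repl.isNone then pvFindNext runs min_hold_frames (p.1.toNat + 1) else repl
        match repl with
        | some q => (some q, r.2.1, r.2.2)
        | none => r)
    new_runs.foldl (fun acc r => acc ++ List.replicate r.2.2 r.1) []

-- ===== PORT B =====
-- Source B's local helper `stable`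
def pvStable (mhf : Int) (r : Option Int × Nat) : Bool :=
  r.1.isSome && decide ((r.2 : Int) ≥ mhf)

-- Source B's RLE: outer while appends one run per maximal block (inner while = span)
def pvRleB : List (Option Int) → List (Option Int × Nat)
  | [] => []
  | v :: rest =>
    let s := rest.span (fun y => y == v)
    (v, s.1.length + 1) :: pvRleB s.2
termination_by l => l.length
decreasing_by
  simp only [List.span_eq_takeWhile_dropWhile, List.length_cons]
  have := List.length_dropWhile_le (p := fun y => y == v) (l := rest)
  omega

-- Source B's forward scan: emit the stable id seen so far, then update it
def pvScanPrev (mhf : Int) : Option Int → List (Option Int × Nat) → List (Option Int)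
  | _, [] => []
  | last, r :: rs => last :: pvScanPrev mhf (if pvStable mhf r then r.1 else last) rs

def debounce_speaker_ids_alt (speaker_track_ids : List (Option Int)) (min_hold_frames : Int) : List (Option Int) :=
  let runs := pvRleB speaker_track_ids
  let prev := pvScanPrev min_hold_frames none runs
  -- backward scan = forward scan of the reversed runs, then reverse
  let next := (pvScanPrev min_hold_frames none runs.reverse).reverse
  (runs.zip (prev.zip next)).foldl (fun acc e =>
    let v := e.1.1
    let v := if v.isSome && decide ((e.1.2 : Int) < min_hold_frames) then
               (let rr := if e.2.1.isSome then e.2.1 else e.2.2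
                if rr.isSome then rr else v)
             else v
    acc ++ List.replicate e.1.2 v) []

-- ===== PRECONDITION & SPEC =====
def Spec_debounce_speaker_ids (speaker_track_ids : List (Option Int)) (min_hold_frames : Int) (out : List (Option Int)) : Prop := out = debounce_speaker_ids_alt speaker_track_ids min_hold_frames
instance (speaker_track_ids : List (Option Int)) (min_hold_frames : Int) (out : List (Option Int)) : Decidable (Spec_debounce_speaker_ids speaker_track_ids min_hold_frames out) := by unfold Spec_debounce_speaker_ids; infer_instance

-- ===== CLAIM (what is proved, stated in full; the proofs are below) =====
def Claim_equal_debounce_speaker_ids : Prop := ∀ (speaker_track_ids : List (Option Int)) (min_hold_frames : Int), Dom_debounce_speaker_ids speaker_track_ids min_hold_frames → Spec_debounce_speaker_ids speaker_track_ids min_hold_frames (debounce_speaker_ids speaker_track_ids min_hold_frames)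

-- ===== LEMMAS AND PROOFS =====

-- projection dropping the start component of A's runs
def pvProj (r : Option Int × Nat × Nat) : Option Int × Nat := (r.1, r.2.2)

def pvStable3 (mhf : Int) (r : Option Int × Nat × Nat) : Bool := pvStable mhf (pvProj r)

-- fold carrying the most recent stable id
def pvStepP (mhf : Int) (last : Option Int) (r : Option Int × Nat) : Option Int :=
  if pvStable mhf r then r.1 else last

-- first stable id of a run list (what the forward search finds)
def pvFirst (mhf : Int) (rs : List (Option Int × Nat)) : Option Int :=
  match rs.find? (pvStable mhf) with
  | some r => r.1
  | none => none

def pvFirst3 (mhf : Int) (rs : List (Option Int × Nat × Nat)) : Option Int :=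
  match rs.find? (pvStable3 mhf) with
  | some r => r.1
  | none => none

-- per-run output frames given the nearest previous/next stable ids
def pvBody (mhf : Int) (r : Option Int × Nat) (p nx : Option Int) : List (Option Int) :=
  List.replicate r.2
    (if r.1.isSome && decide ((r.2 : Int) < mhf) then
       (let rr := if p.isSome then p else nx
        if rr.isSome then rr else r.1)
     else r.1)

-- the common specification both phase-2/3 computations are proved equal to
def pvSpecRuns (mhf : Int) : Option Int → List (Option Int × Nat) → List (Option Int)
  | _, [] => []
  | last, r :: rs => pvBody mhf r last (pvFirst mhf rs) ++ pvSpecRuns mhf (pvStepP mhf last r) rs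

-- A's per-frame RLE loop as structural recursion (cur's run starts at st, next index is pos)
def pvRleAux (cur : Option Int) (st pos : Nat) : List (Option Int) → List (Option Int × Nat × Nat)
  | [] => [(cur, st, pos - st)]
  | y :: ys =>
    if y ≠ cur then (cur, st, pos - st) :: pvRleAux y pos (pos + 1) ys
    else pvRleAux cur st (pos + 1) ys

def pvStepP3 (mhf : Int) (last : Option Int) (r : Option Int × Nat × Nat) : Option Int :=
  if pvStable3 mhf r then r.1 else last

-- A's backward search is the last-stable fold over the prefix
theorem pv_findPrev_eq (rs : List (Option Int × Nat × Nat)) (mhf : Int) (i : Nat)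
    (h : i ≤ rs.length) :
    pvFindPrev rs mhf i = (rs.take i).foldl (pvStepP3 mhf) none := by
  induction i with
  | zero => simp [pvFindPrev]
  | succ j ih =>
    have hj : j < rs.length := h
    rw [List.take_succ_eq_append_getElem hj, List.foldl_append]
    simp only [pvFindPrev, List.foldl_cons, List.foldl_nil, List.getD_eq_getElem rs _ hj]
    simp [pvStepP3, pvStable3, pvStable, pvProj, ih (Nat.le_of_lt hj)]

-- A's forward search is the first stable id of the suffix
theorem pv_findNext_eq (rs : List (Option Int × Nat × Nat)) (mhf : Int) (j : Nat) :
    pvFindNext rs mhf j = pvFirst3 mhf (rs.drop j) := by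
  fun_induction pvFindNext rs mhf j with
  | case1 j h r hstable =>
    rw [List.drop_eq_getElem_cons h]
    simp only [pvFirst3, List.find?_cons]
    simp_all [pvStable3, pvStable, pvProj, r]
  | case2 j h r hstable ih =>
    rw [List.drop_eq_getElem_cons h]
    simp only [pvFirst3, List.find?_cons]
    have hf : pvStable3 mhf rs[j] = false := by
      simpa [pvStable3, pvStable, pvProj, r, Bool.not_eq_true] using hstable
    simp_all [pvFirst3, r]
  | case3 j h =>
    rw [List.drop_eq_nil_of_le (by omega)]
    simp [pvFirst3]

theorem pv_scanPrev_append (mhf : Int) (l : List (Option Int × Nat)) (r : Option Int × Nat)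
    (last : Option Int) :
    pvScanPrev mhf last (l ++ [r]) = pvScanPrev mhf last l ++ [l.foldl (pvStepP mhf) last] := by
  induction l generalizing last with
  | nil => simp [pvScanPrev]
  | cons a t ih => simp [pvScanPrev, ih, pvStepP]

theorem pv_foldl_reverse_first (mhf : Int) (l : List (Option Int × Nat)) (last : Option Int) :
    l.reverse.foldl (pvStepP mhf) last
      = match l.find? (pvStable mhf) with | some r => r.1 | none => last := by
  induction l generalizing last with
  | nil => simp
  | cons a t ih =>
    rw [List.reverse_cons, List.foldl_append]
    simp only [List.foldl_cons, List.foldl_nil, List.find?_cons, ih, pvStepP]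
    by_cases h : pvStable mhf a <;> simp [h]

theorem pv_first3_eq (mhf : Int) (rs : List (Option Int × Nat × Nat)) :
    pvFirst3 mhf rs = pvFirst mhf (rs.map pvProj) := by
  simp only [pvFirst, pvFirst3, List.find?_map]
  have : (pvStable mhf ∘ pvProj) = pvStable3 mhf := rfl
  rw [this]
  cases rs.find? (pvStable3 mhf) <;> simp [pvProj]

-- B's zipped scans compute the common spec
theorem pv_B_main (mhf : Int) (rs : List (Option Int × Nat)) (last : Option Int) :
    (rs.zip ((pvScanPrev mhf last rs).zip ((pvScanPrev mhf none rs.reverse).reverse))).flatMap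
        (fun e => pvBody mhf e.1 e.2.1 e.2.2)
      = pvSpecRuns mhf last rs := by
  induction rs generalizing last with
  | nil => simp [pvScanPrev, pvSpecRuns]
  | cons r t ih =>
    have hnext : (pvScanPrev mhf none ((r :: t).reverse)).reverse
        = pvFirst mhf t :: (pvScanPrev mhf none t.reverse).reverse := by
      rw [List.reverse_cons, pv_scanPrev_append, List.reverse_append,
        pv_foldl_reverse_first]
      rfl
    rw [hnext]
    simp only [pvScanPrev, List.zip_cons_cons, List.flatMap_cons, pvSpecRuns]
    rw [← ih (pvStepP mhf last r)]
    rfl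

-- A's per-run replacement + expansion computes the common spec
theorem pv_A_main (mhf : Int) (rs full : List (Option Int × Nat × Nat)) (k : Nat)
    (last : Option Int) (hdrop : full.drop k = rs) (hk : k ≤ full.length)
    (hlast : (full.take k).foldl (pvStepP3 mhf) none = last) :
    (PySem.List.enumerate rs (k : Int)).flatMap (fun p =>
        pvBody mhf (pvProj p.2) ((full.take p.1.toNat).foldl (pvStepP3 mhf) none)
          (pvFirst3 mhf (full.drop (p.1.toNat + 1))))
      = pvSpecRuns mhf last (rs.map pvProj) := by
  induction rs generalizing k last with
  | nil => simp [pvSpecRuns]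
  | cons r t ih =>
    have hk' : k < full.length := by
      by_contra hh
      rw [List.drop_eq_nil_of_le (by omega)] at hdrop
      simp at hdrop
    have hsplit := List.drop_eq_getElem_cons hk'
    rw [hdrop] at hsplit
    have hpair := (List.cons.injEq _ _ _ _).mp hsplit
    have hget : full[k] = r := hpair.1.symm
    have hdrop' : full.drop (k + 1) = t := hpair.2.symm
    rw [PySem.List.enumerate_cons, List.flatMap_cons]
    have hcast : (k : Int) + 1 = ((k + 1 : Nat) : Int) := by push_cast; ring
    have hlast' : (full.take (k + 1)).foldl (pvStepP3 mhf) none = pvStepP3 mhf last r := by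
      rw [List.take_succ_eq_append_getElem hk', List.foldl_append, hlast, hget]
      simp
    rw [hcast, ih (k + 1) (pvStepP3 mhf last r) hdrop' (by omega) hlast']
    simp only [List.map_cons, pvSpecRuns]
    congr 1
    simp only [Int.toNat_natCast, hlast, hdrop', pv_first3_eq]

-- the body of A's enumerate-map, named for the proofs (the port inlines it)
def pvNewA (runs : List (Option Int × Nat × Nat)) (mhf : Int)
    (p : Int × (Option Int × Nat × Nat)) : Option Int × Nat × Nat :=
  if p.2.1.isNone then p.2
  else if decide ((p.2.2.2 : Int) ≥ mhf) then p.2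
  else
    match (if (pvFindPrev runs mhf p.1.toNat).isNone then pvFindNext runs mhf (p.1.toNat + 1)
           else pvFindPrev runs mhf p.1.toNat) with
    | some q => (some q, p.2.2.1, p.2.2.2)
    | none => p.2

-- the A-map body expands to pvBody
theorem pv_bodyA_aux (mhf : Int) (r : Option Int × Nat × Nat) (p nx : Option Int) :
    List.replicate
      ((if r.1.isNone then r
        else if decide ((r.2.2 : Int) ≥ mhf) then r
        else
          match (if p.isNone then nx else p) with
          | some q => (some q, r.2.1, r.2.2)
          | none => r) : Option Int × Nat × Nat).2.2
      ((if r.1.isNone then r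
        else if decide ((r.2.2 : Int) ≥ mhf) then r
        else
          match (if p.isNone then nx else p) with
          | some q => (some q, r.2.1, r.2.2)
          | none => r) : Option Int × Nat × Nat).1
      = pvBody mhf (pvProj r) p nx := by
  rcases r with ⟨v, st, ln⟩
  simp only [pvBody, pvProj]
  by_cases hv : v = none
  · simp [hv]
  · have hs : v.isSome = true := Option.isSome_iff_ne_none.mpr hv
    by_cases hm : (ln : Int) ≥ mhf
    · simp [Option.isNone_iff_eq_none, hv, hm, not_lt.mpr hm]
    · cases p <;> cases nx <;>
        simp [Option.isNone_iff_eq_none, hv, hs, hm, not_le.mp hm]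

theorem pv_bodyA_eq (runs : List (Option Int × Nat × Nat)) (mhf : Int)
    (p : Int × (Option Int × Nat × Nat)) :
    List.replicate (pvNewA runs mhf p).2.2 (pvNewA runs mhf p).1
      = pvBody mhf (pvProj p.2) (pvFindPrev runs mhf p.1.toNat)
          (pvFindNext runs mhf (p.1.toNat + 1)) := by
  unfold pvNewA
  exact pv_bodyA_aux mhf p.2 _ _

-- A's index-loop RLE equals the structural recursion
def pvFinish (full : List (Option Int))
    (r : List (Option Int × Nat × Nat) × Option Int × Nat) : List (Option Int × Nat × Nat) :=
  r.1 ++ [(r.2.1, r.2.2, full.length - r.2.2)]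

theorem pv_runsA_fold (full : List (Option Int)) (ys : List (Option Int)) (pos : Nat)
    (acc : List (Option Int × Nat × Nat)) (cur : Option Int) (st : Nat)
    (hdrop : full.drop pos = ys) (hpos : pos ≤ full.length) :
    pvFinish full ((List.range' pos ys.length).foldl (pvStepA full) (acc, cur, st))
      = acc ++ pvRleAux cur st pos ys := by
  induction ys generalizing pos acc cur st with
  | nil =>
    have hlen : full.length = pos := le_antisymm (List.drop_eq_nil_iff.mp (by simp [hdrop])) hpos
    simp [pvFinish, pvRleAux, hlen]
  | cons y ys ih =>
    have hpos' : pos < full.length := by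
      by_contra hh
      rw [List.drop_eq_nil_of_le (by omega)] at hdrop
      simp at hdrop
    have hsplit := List.drop_eq_getElem_cons hpos'
    rw [hdrop] at hsplit
    have hpair := (List.cons.injEq _ _ _ _).mp hsplit
    have hget : full[pos]? = some y := by
      rw [List.getElem?_eq_getElem hpos']; exact congrArg some hpair.1.symm
    have hdrop' : full.drop (pos + 1) = ys := hpair.2.symm
    rw [List.length_cons, List.range'_succ, List.foldl_cons]
    by_cases hy : y = cur
    · have hstep : pvStepA full (acc, cur, st) pos = (acc, cur, st) := by
        simp [pvStepA, hget, hy]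
      rw [hstep, ih (pos + 1) acc cur st hdrop' (by omega)]
      simp [pvRleAux, hy]
    · have hstep : pvStepA full (acc, cur, st) pos = (acc ++ [(cur, st, pos - st)], y, pos) := by
        simp [pvStepA, hget, hy]
      rw [hstep, ih (pos + 1) _ y pos hdrop' (by omega)]
      simp [pvRleAux, hy]

theorem pv_runsA_eq (x : Option Int) (rest : List (Option Int)) :
    pvRunsA (x :: rest) = pvRleAux x 0 1 rest := by
  have h := pv_runsA_fold (x :: rest) rest 1 [] x 0 (by simp) (by simp)
  simpa [pvRunsA, pvFinish] using h

theorem pv_rleAux_proj (rest : List (Option Int)) (cur : Option Int) (st pos : Nat)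
    (h : st ≤ pos) :
    (pvRleAux cur st pos rest).map pvProj
      = (cur, (pos - st) + (rest.takeWhile (fun y => y == cur)).length)
          :: pvRleB (rest.dropWhile (fun y => y == cur)) := by
  induction rest generalizing cur st pos with
  | nil => simp [pvRleAux, pvRleB, pvProj]
  | cons y ys ih =>
    by_cases hy : y = cur
    · rw [pvRleAux, if_neg (by simp [hy])]
      rw [ih cur st (pos + 1) (by omega)]
      simp only [List.takeWhile_cons, List.dropWhile_cons, hy, beq_self_eq_true, if_true,
        List.length_cons]
      have harith : pos + 1 - st + (List.takeWhile (fun y => y == cur) ys).length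
          = pos - st + ((List.takeWhile (fun y => y == cur) ys).length + 1) := by omega
      rw [harith]
    · rw [pvRleAux, if_pos hy]
      simp only [List.map_cons, ih y pos (pos + 1) (by omega)]
      have hbeq : (y == cur) = false := by simp [hy]
      simp only [List.takeWhile_cons, List.dropWhile_cons, hbeq, Bool.false_eq_true, if_false]
      rw [pvRleB]
      simp only [List.span_eq_takeWhile_dropWhile, pvProj, List.length_nil, Nat.add_zero]
      have harith : pos + 1 - pos + (List.takeWhile (fun z => z == y) ys).length
          = (List.takeWhile (fun z => z == y) ys).length + 1 := by omega
      rw [harith]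

theorem pv_runs_proj (x : Option Int) (rest : List (Option Int)) :
    (pvRunsA (x :: rest)).map pvProj = pvRleB (x :: rest) := by
  rw [pv_runsA_eq, pv_rleAux_proj rest x 0 1 (by omega), pvRleB]
  simp only [List.span_eq_takeWhile_dropWhile]
  have harith : 1 - 0 + (List.takeWhile (fun y => y == x) rest).length
      = (List.takeWhile (fun y => y == x) rest).length + 1 := by omega
  rw [harith]

-- ===== VERDICT (by name: the statement is the Claim_ definition above) =====
theorem pv_final (x : Option Int) (rest : List (Option Int)) (mhf : Int) :
    debounce_speaker_ids (x :: rest) mhf = debounce_speaker_ids_alt (x :: rest) mhf := by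
  have hB : debounce_speaker_ids_alt (x :: rest) mhf
      = pvSpecRuns mhf none (pvRleB (x :: rest)) := by
    rw [← pv_B_main mhf (pvRleB (x :: rest)) none]
    show ((pvRleB (x :: rest)).zip
        ((pvScanPrev mhf none (pvRleB (x :: rest))).zip
          ((pvScanPrev mhf none (pvRleB (x :: rest)).reverse).reverse))).foldl
        (fun acc e => acc ++ (fun e => pvBody mhf e.1 e.2.1 e.2.2) e) [] = _
    rw [PySem.List.foldl_append_eq_flatMap, List.nil_append]
  have hA1 : debounce_speaker_ids (x :: rest) mhf
      = (PySem.List.enumerate (pvRunsA (x :: rest)) 0).flatMap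
          (fun p => List.replicate (pvNewA (pvRunsA (x :: rest)) mhf p).2.2
            (pvNewA (pvRunsA (x :: rest)) mhf p).1) := by
    show ((PySem.List.enumerate (pvRunsA (x :: rest)) 0).map
        (pvNewA (pvRunsA (x :: rest)) mhf)).foldl
        (fun acc r => acc ++ (fun r' => List.replicate r'.2.2 r'.1) r) [] = _
    rw [PySem.List.foldl_append_eq_flatMap, List.nil_append, List.flatMap_map]
  rw [hA1, hB]
  have hA2 : (PySem.List.enumerate (pvRunsA (x :: rest)) 0).flatMap
        (fun p => List.replicate (pvNewA (pvRunsA (x :: rest)) mhf p).2.2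
          (pvNewA (pvRunsA (x :: rest)) mhf p).1)
      = (PySem.List.enumerate (pvRunsA (x :: rest)) ((0 : Nat) : Int)).flatMap (fun p =>
          pvBody mhf (pvProj p.2)
            (((pvRunsA (x :: rest)).take p.1.toNat).foldl (pvStepP3 mhf) none)
            (pvFirst3 mhf ((pvRunsA (x :: rest)).drop (p.1.toNat + 1)))) := by
    apply List.flatMap_congr
    intro p hp
    rw [PySem.List.mem_enumerate_iff] at hp
    obtain ⟨k, hk, rfl⟩ := hp
    rw [pv_bodyA_eq]
    have ht : ((0 : Int) + (k : Nat)).toNat = k := by omega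
    rw [ht, pv_findPrev_eq _ _ _ (Nat.le_of_lt hk), pv_findNext_eq]
  rw [hA2, pv_A_main mhf (pvRunsA (x :: rest)) (pvRunsA (x :: rest)) 0 none rfl
    (Nat.zero_le _) rfl, pv_runs_proj]

-- ===== end of helper lemmas =====

theorem debounce_speaker_ids_spec : Claim_equal_debounce_speaker_ids := by
  intro xs mhf _
  unfold Spec_debounce_speaker_ids
  cases xs with
  | nil => simp [debounce_speaker_ids, debounce_speaker_ids_alt, pvRleB, pvScanPrev]
  | cons x rest => exact pv_final x rest mhf
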